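-- pv_equiv track=rewrite | github.com/malmocopenhagen/parsel | backend/csv_generator.py | _clean_cell
-- ===== SOURCE A (Python) =====
-- def _clean_cell(cell: str) -> str:
--     """Clean individual cell data."""
--     if not cell:
--         return ""
--
--     # Remove extra whitespace
--     cleaned = cell.strip()
--
--     # Remove common OCR artifacts
--     cleaned = cleaned.replace('\n', ' ').replace('\r', ' ')
--     cleaned = ' '.join(cleaned.split())  # Normalize whitespace
--
--     # Remove control characters
--     cleaned = ''.join(char for char in cleaned if ord(char) >= 32 or char in '\t\n\r')
--
--     return cleaned
-- ===== SOURCE B (Python) =====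
-- def _clean_cell(cell: str) -> str:
--     """Clean individual cell data: single left-to-right pass with a pending-space flag."""
--     out = []
--     pending = False
--     for ch in cell:
--         if ch.isspace():
--             pending = bool(out)
--         elif ord(ch) >= 32:
--             if pending:
--                 out.append(' ')
--                 pending = False
--             out.append(ch)
--         # control characters below 32 that are not whitespace are dropped
--     return ''.join(out)
-- ===== Notes on version B (the rewrite author's own statement) =====
-- stated objective: alternative
-- what changed: Replaces A's four-stage pipeline (strip, two replaces, split/join, control-char filter) with a single left-to-right pass that maintains an output accumulator and a pending-space flag, emitting each word's characters directly.
import Mathlib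
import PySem

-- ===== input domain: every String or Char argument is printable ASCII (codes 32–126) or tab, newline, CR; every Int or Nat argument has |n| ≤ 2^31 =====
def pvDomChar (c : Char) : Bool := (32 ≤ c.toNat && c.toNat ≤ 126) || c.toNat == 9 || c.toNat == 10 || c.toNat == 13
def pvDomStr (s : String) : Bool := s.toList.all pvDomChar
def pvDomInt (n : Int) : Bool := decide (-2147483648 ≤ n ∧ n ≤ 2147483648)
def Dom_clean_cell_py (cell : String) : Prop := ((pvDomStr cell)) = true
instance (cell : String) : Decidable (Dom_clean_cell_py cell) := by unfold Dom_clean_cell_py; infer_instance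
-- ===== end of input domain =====

-- B replaces A's four-stage pipeline with a single left-to-right pass keeping a pending-space flag (alternative decomposition, same O(n) cost).

-- ===== PORT A =====
def clean_cell_py (cell : String) : String :=
  if cell = "" then ""
  else
    let c1 := PySem.Str.strip cell
    let c2 := PySem.Str.replace (PySem.Str.replace c1 "\n" " ") "\r" " "
    let c3 := PySem.Str.join " " (PySem.Str.split₀ c2)
    String.ofList (c3.toList.filter (fun ch => decide (32 ≤ ch.toNat) || decide (ch ∈ ['\t', '\n', '\r'])))

-- ===== PORT B =====
def pvAltStep (st : List Char × Bool) (c : Char) : List Char × Bool :=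
  if PySem.Chars.isspace c then (st.1, !st.1.isEmpty)
  else if 32 ≤ c.toNat then (st.1 ++ (if st.2 then [' ', c] else [c]), false)
  else st

def clean_cell_py_alt (cell : String) : String :=
  String.ofList (cell.toList.foldl pvAltStep ([], false)).1

-- ===== PRECONDITION & SPEC =====
def Spec_clean_cell_py (cell : String) (out : String) : Prop := out = clean_cell_py_alt cell
instance (cell : String) (out : String) : Decidable (Spec_clean_cell_py cell out) := by unfold Spec_clean_cell_py; infer_instance

-- ===== CLAIM (what is proved, stated in full; the proofs are below) =====
def Claim_equal_clean_cell_py : Prop := ∀ (cell : String), Dom_clean_cell_py cell → Spec_clean_cell_py cell (clean_cell_py cell)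

-- ===== LEMMAS AND PROOFS =====

-- words of a char list (`cur` holds the reversed current word), mirroring PySem.Chars.split₀.go without the word accumulator
def pvW : List Char → List Char → List (List Char)
  | [], cur => if cur.isEmpty then [] else [cur.reverse]
  | c :: t, cur =>
    if PySem.Chars.isspace c then
      if cur.isEmpty then pvW t [] else cur.reverse :: pvW t []
    else pvW t (c :: cur)

def pvLead : List Char → Bool
  | [] => false
  | c :: _ => PySem.Chars.isspace c

def pvJ (cs : List Char) : List Char := PySem.Chars.join [' '] (pvW cs [])

def pvK (t : List Char) : List Char :=
  (if pvW t [] = [] then [] else if pvLead t then [' '] else []) ++ pvJ t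

lemma pvNotEmpty {cur : List Char} (h : cur ≠ []) : cur.isEmpty = false := by
  cases cur with
  | nil => exact absurd rfl h
  | cons x xs => rfl

lemma pvW_go (s : List Char) : ∀ (cur : List Char) (acc : List (List Char)),
    PySem.Chars.split₀.go s cur acc = acc.reverse ++ pvW s cur := by
  induction s with
  | nil =>
      intro cur acc
      by_cases h : cur.isEmpty = true <;> simp [PySem.Chars.split₀.go, pvW, h]
  | cons c t ih =>
      intro cur acc
      by_cases hw : PySem.Chars.isspace c
      · by_cases h : cur.isEmpty = true <;>
          simp [PySem.Chars.split₀.go, pvW, hw, h, ih]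
      · simp [PySem.Chars.split₀.go, pvW, hw, ih]

lemma pvSplit₀_eq (s : List Char) : PySem.Chars.split₀ s = pvW s [] := by
  have := pvW_go s [] []
  simpa [PySem.Chars.split₀] using this

lemma pvJoin_cons (sep p : List Char) (rest : List (List Char)) :
    PySem.Chars.join sep (p :: rest) =
      p ++ (if rest = [] then [] else sep ++ PySem.Chars.join sep rest) := by
  cases rest with
  | nil => simp [PySem.Chars.join, List.intercalate]
  | cons q r => simp [PySem.Chars.join_cons_cons]

lemma pvW_ne_nil (t : List Char) : ∀ cur, cur ≠ [] → pvW t cur ≠ [] := by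
  induction t with
  | nil => intro cur h; simp [pvW, pvNotEmpty h]
  | cons c t ih =>
      intro cur h
      by_cases hw : PySem.Chars.isspace c
      · simp [pvW, hw, pvNotEmpty h]
      · simpa [pvW, hw] using ih (c :: cur) (by simp)

lemma pvG (t : List Char) : ∀ cur, cur ≠ [] →
    PySem.Chars.join [' '] (pvW t cur) = cur.reverse ++ pvK t := by
  induction t with
  | nil =>
      intro cur h
      simp [pvW, pvK, pvJ, pvNotEmpty h, PySem.Chars.join, List.intercalate]
  | cons c t ih =>
      intro cur h
      by_cases hw : PySem.Chars.isspace c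
      · have h1 : pvW (c :: t) cur = cur.reverse :: pvW t [] := by
          simp [pvW, hw, pvNotEmpty h]
        have h2 : pvK (c :: t) =
            (if pvW t [] = [] then [] else [' ']) ++ pvJ t := by
          unfold pvK pvJ pvLead
          simp [pvW, hw]
        rw [h1, pvJoin_cons, h2]
        by_cases hn : pvW t [] = []
        · simp [hn, pvJ, PySem.Chars.join, List.intercalate]
        · simp [hn, pvJ]
      · have h1 : pvW (c :: t) cur = pvW t (c :: cur) := by simp [pvW, hw]
        rw [h1, ih (c :: cur) (by simp)]
        have hK : pvK (c :: t) = c :: pvK t := by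
          unfold pvK
          have hW : pvW (c :: t) [] = pvW t [c] := by simp [pvW, hw]
          have hne : pvW t [c] ≠ [] := pvW_ne_nil t [c] (by simp)
          have hlead : pvLead (c :: t) = false := by simp [pvLead, hw]
          have hj : pvJ (c :: t) = [c] ++ pvK t := by
            unfold pvJ
            rw [hW]
            exact ih [c] (by simp)
          rw [hW, hlead, if_neg hne, hj]
          simp [pvK]
        rw [hK]
        simp

lemma pvW_map (f : Char → Char)
    (hf : ∀ c, PySem.Chars.isspace (f c) = PySem.Chars.isspace c ∧
      (PySem.Chars.isspace c = false → f c = c)) :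
    ∀ (t cur : List Char), pvW (t.map f) cur = pvW t cur := by
  intro t
  induction t with
  | nil => intro cur; simp
  | cons c t ih =>
      intro cur
      by_cases hw : PySem.Chars.isspace c
      · simp [pvW, (hf c).1, hw, ih]
      · have hc : f c = c := (hf c).2 (by simp [hw])
        simp [pvW, hw, hc, ih]

lemma pvW_dropWhile (t : List Char) :
    pvW (t.dropWhile PySem.Chars.isspace) [] = pvW t [] := by
  induction t with
  | nil => rfl
  | cons c t ih =>
      by_cases hw : PySem.Chars.isspace c
      · simpa [List.dropWhile, hw, pvW] using ih
      · simp [List.dropWhile, hw]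

lemma pvW_all_ws (tr : List Char) : (∀ c ∈ tr, PySem.Chars.isspace c = true) →
    ∀ cur, pvW tr cur = if cur.isEmpty then [] else [cur.reverse] := by
  induction tr with
  | nil => intro _ cur; simp [pvW]
  | cons c t ih =>
      intro h cur
      have hc : PySem.Chars.isspace c = true := h c (by simp)
      have ht : ∀ x ∈ t, PySem.Chars.isspace x = true := fun x hx => h x (by simp [hx])
      by_cases hcur : cur.isEmpty = true
      · simp [pvW, hc, hcur, ih ht]
      · simp [pvW, hc, hcur, ih ht]

lemma pvW_append_ws (tr : List Char) (h : ∀ c ∈ tr, PySem.Chars.isspace c = true) :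
    ∀ (t cur : List Char), pvW (t ++ tr) cur = pvW t cur := by
  intro t
  induction t with
  | nil =>
      intro cur
      simp [pvW_all_ws tr h cur, pvW]
  | cons c t ih =>
      intro cur
      by_cases hw : PySem.Chars.isspace c
      · by_cases hcur : cur.isEmpty = true <;> simp [pvW, hw, hcur, ih]
      · simp [pvW, hw, ih]

lemma pvW_rstrip (s : List Char) : pvW (PySem.Chars.rstrip s) [] = pvW s [] := by
  have hdec : s = PySem.Chars.rstrip s ++ (s.reverse.takeWhile PySem.Chars.isspace).reverse := by
    show s = (List.dropWhile PySem.Chars.isspace s.reverse).reverse ++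
      (List.takeWhile PySem.Chars.isspace s.reverse).reverse
    rw [← List.reverse_append, List.takeWhile_append_dropWhile, List.reverse_reverse]
  have hws : ∀ c ∈ (s.reverse.takeWhile PySem.Chars.isspace).reverse,
      PySem.Chars.isspace c = true := by
    intro c hc
    rw [List.mem_reverse] at hc
    exact List.mem_takeWhile_imp hc
  conv_rhs => rw [hdec]
  rw [pvW_append_ws _ hws]

lemma pvW_strip (s : List Char) : pvW (PySem.Chars.strip s) [] = pvW s [] := by
  have h1 : PySem.Chars.strip s = PySem.Chars.rstrip (List.dropWhile PySem.Chars.isspace s) := rfl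
  rw [h1, pvW_rstrip, pvW_dropWhile]

lemma pvReplace_go_single (a b : Char) :
    ∀ (l : List Char) (fuel : Nat) (acc : List Char), l.length ≤ fuel →
      PySem.Chars.replace.go [a] [b] fuel l acc =
        acc.reverse ++ l.map (fun c => if c = a then b else c) := by
  intro l
  induction l with
  | nil =>
      intro fuel acc _
      cases fuel <;> simp [PySem.Chars.replace.go]
  | cons c t ih =>
      intro fuel acc hle
      cases fuel with
      | zero => simp at hle
      | succ f =>
          by_cases hca : a = c
          · subst hca
            have hpre : [a].isPrefixOf (a :: t) = true := by
              simp [List.isPrefixOf]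
            have hgo : PySem.Chars.replace.go [a] [b] (f + 1) (a :: t) acc
                = PySem.Chars.replace.go [a] [b] f t (b :: acc) := by
              simp [PySem.Chars.replace.go, hpre]
            rw [hgo, ih f (b :: acc) (by simp at hle ⊢; omega)]
            simp
          · have hpre : [a].isPrefixOf (c :: t) = false := by
              simp [List.isPrefixOf, hca]
            have hgo : PySem.Chars.replace.go [a] [b] (f + 1) (c :: t) acc
                = PySem.Chars.replace.go [a] [b] f t (c :: acc) := by
              simp [PySem.Chars.replace.go, hpre]
            rw [hgo, ih f (c :: acc) (by simp at hle ⊢; omega)]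
            have hne : ¬ c = a := fun h => hca h.symm
            simp [hne]

lemma pvReplace_single (s : List Char) (a b : Char) :
    PySem.Chars.replace s [a] [b] = s.map (fun c => if c = a then b else c) := by
  have h1 : ([a] : List Char).isEmpty = false := rfl
  unfold PySem.Chars.replace
  rw [h1]
  simp only [Bool.false_eq_true, if_false]
  rw [pvReplace_go_single a b s s.length [] le_rfl]
  simp

lemma pvMem_join_space (parts : List (List Char)) (c : Char)
    (h : c ∈ PySem.Chars.join [' '] parts) : c = ' ' ∨ ∃ w ∈ parts, c ∈ w := by
  induction parts with
  | nil => simp [PySem.Chars.join, List.intercalate] at h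
  | cons p rest ih =>
      rw [pvJoin_cons] at h
      rcases List.mem_append.1 h with hp | hrest
      · exact Or.inr ⟨p, by simp, hp⟩
      · by_cases hr : rest = []
        · simp [hr] at hrest
        · simp only [if_neg hr] at hrest
          rcases List.mem_append.1 hrest with hs | hj
          · simp at hs; exact Or.inl hs
          · rcases ih hj with h1 | ⟨w, hw, hcw⟩
            · exact Or.inl h1
            · exact Or.inr ⟨w, by simp [hw], hcw⟩

lemma pvW_mem (t : List Char) : ∀ (cur : List Char) (w : List Char) (c : Char),
    w ∈ pvW t cur → c ∈ w → (∀ x ∈ cur, PySem.Chars.isspace x = false) →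
    PySem.Chars.isspace c = false ∧ (c ∈ cur ∨ c ∈ t) := by
  induction t with
  | nil =>
      intro cur w c hw hc hcur
      by_cases h : cur.isEmpty = true
      · simp [pvW, h] at hw
      · have hcurF : cur.isEmpty = false := eq_false_of_ne_true h
        rw [show pvW ([] : List Char) cur = [cur.reverse] from by simp [pvW, hcurF]] at hw
        rw [List.mem_singleton] at hw
        subst hw
        rw [List.mem_reverse] at hc
        exact ⟨hcur c hc, Or.inl hc⟩
  | cons d t ih =>
      intro cur w c hw hc hcur
      by_cases hd : PySem.Chars.isspace d
      · by_cases h : cur.isEmpty = true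
        · simp only [pvW, hd, h] at hw
          rcases ih [] w c hw hc (by simp) with ⟨h1, h2⟩
          simp only [List.not_mem_nil, false_or] at h2
          exact ⟨h1, Or.inr (by simp [h2])⟩
        · have hcurF : cur.isEmpty = false := eq_false_of_ne_true h
          rw [show pvW (d :: t) cur = cur.reverse :: pvW t [] from by
            simp [pvW, hd, hcurF]] at hw
          rcases List.mem_cons.1 hw with hw1 | hw2
          · subst hw1
            rw [List.mem_reverse] at hc
            exact ⟨hcur c hc, Or.inl hc⟩
          · rcases ih [] w c hw2 hc (by simp) with ⟨h1, h2⟩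
            simp only [List.not_mem_nil, false_or] at h2
            exact ⟨h1, Or.inr (by simp [h2])⟩
      · simp only [pvW, hd, Bool.false_eq_true, if_false] at hw
        have hcur' : ∀ x ∈ d :: cur, PySem.Chars.isspace x = false := by
          intro x hx
          rcases List.mem_cons.1 hx with h1 | h2
          · subst h1; simp [hd]
          · exact hcur x h2
        rcases ih (d :: cur) w c hw hc hcur' with ⟨h1, h2⟩
        rcases h2 with h2 | h2
        · rcases List.mem_cons.1 h2 with h3 | h3
          · subst h3; exact ⟨h1, Or.inr (by simp)⟩
          · exact ⟨h1, Or.inl h3⟩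
        · exact ⟨h1, Or.inr (by simp [h2])⟩

lemma pvGe32 (c : Char) (h1 : pvDomChar c = true)
    (h2 : PySem.Chars.isspace c = false) : 32 ≤ c.toNat := by
  simp [pvDomChar] at h1
  simp [PySem.Chars.isspace] at h2
  omega

lemma pvB (cs : List Char) : ∀ (acc : List Char) (pend : Bool),
    (∀ c ∈ cs, pvDomChar c = true) → (pend = true → acc ≠ []) →
    (cs.foldl pvAltStep (acc, pend)).1 =
      acc ++ (if pvW cs [] = [] then []
              else if (pend || (!acc.isEmpty && pvLead cs)) then [' '] else []) ++ pvJ cs := by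
  induction cs with
  | nil =>
      intro acc pend _ _
      simp [pvW, pvJ, PySem.Chars.join, List.intercalate]
  | cons c t ih =>
      intro acc pend hdom hp
      have hdomt : ∀ x ∈ t, pvDomChar x = true := fun x hx => hdom x (by simp [hx])
      by_cases hw : PySem.Chars.isspace c
      · have hstep : pvAltStep (acc, pend) c = (acc, !acc.isEmpty) := by
          simp [pvAltStep, hw]
        rw [List.foldl_cons, hstep,
          ih acc (!acc.isEmpty) hdomt (by intro h; cases acc <;> simp_all)]
        have hW : pvW (c :: t) [] = pvW t [] := by simp [pvW, hw]
        have hJ : pvJ (c :: t) = pvJ t := by simp [pvJ, hW]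
        have hlead : pvLead (c :: t) = true := by simp [pvLead, hw]
        rw [hW, hJ, hlead]
        have hcond : (!acc.isEmpty || (!acc.isEmpty && pvLead t)) =
            (pend || (!acc.isEmpty && true)) := by
          cases hpe : pend with
          | false => cases acc <;> cases pvLead t <;> simp
          | true =>
              have : acc ≠ [] := hp hpe
              rw [pvNotEmpty this]
              simp
        rw [hcond]
      · have h32 : 32 ≤ c.toNat := pvGe32 c (hdom c (by simp)) (by simp [hw])
        have hstep : pvAltStep (acc, pend) c =
            (acc ++ (if pend then [' ', c] else [c]), false) := by
          simp [pvAltStep, hw, h32]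
        rw [List.foldl_cons, hstep, ih _ false hdomt (by simp)]
        have hacc' : (acc ++ (if pend then [' ', c] else [c])).isEmpty = false := by
          cases pend <;> simp
        rw [hacc']
        have hW : pvW (c :: t) [] = pvW t [c] := by simp [pvW, hw]
        have hWne : pvW t [c] ≠ [] := pvW_ne_nil t [c] (by simp)
        have hJ : pvJ (c :: t) = [c] ++ pvK t := by
          unfold pvJ
          rw [hW]
          exact pvG t [c] (by simp)
        have hlead : pvLead (c :: t) = false := by simp [pvLead, hw]
        rw [hJ, hlead, hW, if_neg hWne]
        unfold pvK
        cases pend <;> simp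

lemma pvMapCond (a : Char) (ha : PySem.Chars.isspace a = true) :
    ∀ c, PySem.Chars.isspace (if c = a then ' ' else c) = PySem.Chars.isspace c ∧
      (PySem.Chars.isspace c = false → (if c = a then ' ' else c) = c) := by
  intro c
  by_cases hc : c = a
  · subst hc
    refine ⟨?_, fun h => ?_⟩
    · rw [if_pos rfl, ha]; decide
    · simp [ha] at h
  · simp [hc]

-- ===== VERDICT (by name: the statement is the Claim_ definition above) =====
theorem clean_cell_py_spec : Claim_equal_clean_cell_py := by
  intro cell hdom
  unfold Spec_clean_cell_py
  by_cases hc : cell = ""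
  · subst hc; rfl
  · have hdom' : ∀ c ∈ cell.toList, pvDomChar c = true := by
      unfold Dom_clean_cell_py pvDomStr at hdom
      exact fun c hc => List.all_eq_true.1 hdom c hc
    have hB : clean_cell_py_alt cell = String.ofList (pvJ cell.toList) := by
      unfold clean_cell_py_alt
      rw [pvB cell.toList [] false hdom' (by simp)]
      simp
    have hc2 : (PySem.Str.replace (PySem.Str.replace (PySem.Str.strip cell) "\n" " ") "\r" " ").toList
        = ((PySem.Chars.strip cell.toList).map (fun c => if c = '\n' then ' ' else c)).map
            (fun c => if c = '\r' then ' ' else c) := by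
      simp only [PySem.Str.toList_replace, PySem.Str.toList_strip]
      rw [show ("\n" : String).toList = ['\n'] from rfl,
          show ("\r" : String).toList = ['\r'] from rfl,
          show (" " : String).toList = [' '] from rfl]
      rw [pvReplace_single, pvReplace_single]
    have hc3 : (PySem.Str.join " "
        (PySem.Str.split₀ (PySem.Str.replace (PySem.Str.replace (PySem.Str.strip cell) "\n" " ") "\r" " "))).toList
        = pvJ cell.toList := by
      simp only [PySem.Str.toList_join, PySem.Str.split₀_map_toList]
      rw [show (" " : String).toList = [' '] from rfl]
      rw [hc2, pvSplit₀_eq]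
      rw [pvW_map _ (pvMapCond '\r' (by decide)),
          pvW_map _ (pvMapCond '\n' (by decide)),
          pvW_strip]
      rfl
    have hfilter : (pvJ cell.toList).filter
        (fun ch => decide (32 ≤ ch.toNat) || decide (ch ∈ ['\t', '\n', '\r'])) = pvJ cell.toList := by
      rw [List.filter_eq_self]
      intro a ha
      rcases pvMem_join_space _ a ha with h | ⟨w, hw, haw⟩
      · subst h; decide
      · rcases pvW_mem cell.toList [] w a hw haw (by simp) with ⟨hws, hmem⟩
        have hmem' : a ∈ cell.toList := by
          rcases hmem with h | h
          · simp at h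
          · exact h
        have := pvGe32 a (hdom' a hmem') hws
        simp [this]
    unfold clean_cell_py
    rw [if_neg hc]
    simp only [hc3, hfilter]
    rw [hB]
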